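-- pv_equiv track=rewrite | github.com/MayHyeyeonKim/algorithms | 2024/other/heakerrank/String_Patterns.py | calculateWays
-- ===== SOURCE A (Python) =====
-- MOD = 10**9 + 7
--
-- def calculateWays(wordLen, maxVowels):
--     C = 21
--     V = 5
--     dp = [[0] * (maxVowels + 1) for _ in range(wordLen + 1)]
--
--     for i in range(maxVowels + 1):
--         dp[0][i] = 1
--
--     for i in range(1, wordLen + 1):
--         for j in range(maxVowels + 1):
--             dp[i][j] += dp[i - 1][maxVowels] * C % MOD
--             if j > 0:
--                 dp[i][j] += dp[i - 1][j - 1] * V % MOD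
--             dp[i][j] %= MOD
--     return dp[wordLen][maxVowels]
-- ===== SOURCE B (Python) =====
-- MOD = 10**9 + 7
--
-- def calculateWays(wordLen, maxVowels):
--     # a[n] = number of valid words of length n; for n <= maxVowels the vowel cap
--     # is inactive, so a[n] = 26^n.  For longer words a[n] satisfies the linear
--     # recurrence a[n] = 21 * sum_{k=1}^{maxVowels+1} 5^(k-1) * a[n-k], which we
--     # evaluate with an O(1)-per-step sliding weighted sum S.
--     a = [1]
--     for _ in range(maxVowels):
--         a.append(a[-1] * 26 % MOD)
--     S = 0
--     for v in a:
--         S = (S * 5 + v) % MOD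
--     p5 = pow(5, maxVowels + 1, MOD)
--     for n in range(maxVowels + 1, wordLen + 1):
--         an = 21 * S % MOD
--         a.append(an)
--         S = (5 * S + an - p5 * a[n - maxVowels - 1]) % MOD
--     return a[wordLen]
-- ===== Notes on version B (the rewrite author's own statement) =====
-- stated objective: faster
-- what changed: Replaces the (wordLen+1)x(maxVowels+1) DP table by a one-dimensional linear recurrence on the answer sequence (a[n]=26^n while the cap is inactive, then a[n]=21*sum 5^(k-1)a[n-k]) evaluated with an O(1)-per-step sliding weighted sum.
import Mathlib
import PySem

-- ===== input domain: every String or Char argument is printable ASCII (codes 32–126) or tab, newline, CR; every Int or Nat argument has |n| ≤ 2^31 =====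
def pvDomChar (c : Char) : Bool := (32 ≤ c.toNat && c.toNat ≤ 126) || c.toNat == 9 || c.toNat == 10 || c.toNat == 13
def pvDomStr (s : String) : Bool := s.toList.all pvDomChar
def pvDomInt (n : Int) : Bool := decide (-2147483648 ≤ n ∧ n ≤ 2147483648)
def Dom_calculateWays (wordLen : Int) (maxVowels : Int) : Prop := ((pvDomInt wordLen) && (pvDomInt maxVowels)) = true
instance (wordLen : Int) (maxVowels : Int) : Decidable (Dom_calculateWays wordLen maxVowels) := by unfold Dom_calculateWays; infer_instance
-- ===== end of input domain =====

-- B replaces A's (wordLen+1)x(maxVowels+1) DP table by a linear recurrence on the answer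
-- sequence evaluated with a sliding weighted sum (objective: faster).


-- ===== PORT A =====
def pvMOD : Int := 1000000007

-- dp[i][j] (two-level read; default never reached on inputs satisfying Pre_, where every
-- index used is nonnegative and in range — outside Pre_ Python raises IndexError)
def pvGet2 (dp : Array (Array Int)) (i j : Int) : Int :=
  (dp.getD i.toNat #[]).getD j.toNat 0

-- dp[i][j] = v (indices are nonnegative and in range at every use site under Pre_;
-- Array mirrors the O(1) in-place update of the Python list)
def pvSet2 (dp : Array (Array Int)) (i j : Int) (v : Int) : Array (Array Int) :=
  dp.modify i.toNat (fun row => row.setIfInBounds j.toNat v)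

def calculateWays (wordLen : Int) (maxVowels : Int) : Int :=
  let C : Int := 21
  let V : Int := 5
  let dp : Array (Array Int) :=
    ((PySem.List.pyRange 0 (wordLen + 1) 1).map
      (fun _ => (PySem.List.pyRepeat [(0 : Int)] (maxVowels + 1)).toArray)).toArray
  let dp := (PySem.List.pyRange 0 (maxVowels + 1) 1).foldl (fun dp i => pvSet2 dp 0 i 1) dp
  let dp := (PySem.List.pyRange 1 (wordLen + 1) 1).foldl (fun dp i =>
    (PySem.List.pyRange 0 (maxVowels + 1) 1).foldl (fun dp j =>
      let dp := pvSet2 dp i j (pvGet2 dp i j + PySem.Int.mod (pvGet2 dp (i - 1) maxVowels * C) pvMOD)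
      let dp := if j > 0 then
          pvSet2 dp i j (pvGet2 dp i j + PySem.Int.mod (pvGet2 dp (i - 1) (j - 1) * V) pvMOD)
        else dp
      pvSet2 dp i j (PySem.Int.mod (pvGet2 dp i j) pvMOD)) dp) dp
  pvGet2 dp wordLen maxVowels

-- ===== PORT B =====
def calculateWays_alt (wordLen : Int) (maxVowels : Int) : Int :=
  -- a = [1]; for _ in range(maxVowels): a.append(a[-1] * 26 % MOD)
  -- (Array.push mirrors list.append; a[-1] reads the last element, a is never empty)
  let a : Array Int := (PySem.List.pyRange 0 maxVowels 1).foldl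
    (fun a _ => a.push (PySem.Int.mod ((a.getD (a.size - 1) 0) * 26) pvMOD)) #[1]
  -- S = 0; for v in a: S = (S * 5 + v) % MOD
  let S : Int := a.foldl (fun S v => PySem.Int.mod (S * 5 + v) pvMOD) 0
  -- p5 = pow(5, maxVowels + 1, MOD)  (exponent nonnegative under Pre_)
  let p5 : Int := PySem.Int.powMod 5 (maxVowels + 1).toNat pvMOD
  let r := (PySem.List.pyRange (maxVowels + 1) (wordLen + 1) 1).foldl
    (fun (p : Array Int × Int) n =>
      let an := PySem.Int.mod (21 * p.2) pvMOD
      let a' := p.1.push an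
      (a', PySem.Int.mod (5 * p.2 + an - p5 * (a'.getD (n - maxVowels - 1).toNat 0)) pvMOD))
    (a, S)
  -- a[wordLen] (in range under Pre_)
  r.1.getD wordLen.toNat 0

-- ===== PRECONDITION & SPEC =====
-- On wordLen < 0 or maxVowels < 0 the Python A raises IndexError (dp, or its rows, are empty).
def Pre_calculateWays (wordLen : Int) (maxVowels : Int) : Prop := 0 ≤ wordLen ∧ 0 ≤ maxVowels
instance (wordLen : Int) (maxVowels : Int) : Decidable (Pre_calculateWays wordLen maxVowels) := by
  unfold Pre_calculateWays; infer_instance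

def pvWitness_calculateWays : Int × Int := (3, 1)

def Spec_calculateWays (wordLen : Int) (maxVowels : Int) (out : Int) : Prop := out = calculateWays_alt wordLen maxVowels
instance (wordLen : Int) (maxVowels : Int) (out : Int) : Decidable (Spec_calculateWays wordLen maxVowels out) := by unfold Spec_calculateWays; infer_instance

-- ===== CLAIM (what is proved, stated in full; the proofs are below) =====
def Claim_equal_calculateWays : Prop := ∀ (wordLen : Int) (maxVowels : Int), Dom_calculateWays wordLen maxVowels → Pre_calculateWays wordLen maxVowels → Spec_calculateWays wordLen maxVowels (calculateWays wordLen maxVowels)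

-- ===== LEMMAS AND PROOFS =====

-- The common mathematical description: pvA M n is the value A stores in dp[n][M]
-- (and B stores in a[n]).  pvHist M n lists [a n, a (n-1), …, a 0].
def pvHist (M : ℕ) : ℕ → List Int
  | 0 => [1]
  | n + 1 =>
    let h := pvHist M n
    (if n + 1 ≤ M then (26 : Int) ^ (n + 1) % pvMOD
     else (21 * ∑ k ∈ Finset.range (M + 1), (5 : Int) ^ k * h.getD k 0) % pvMOD) :: h

def pvA (M n : ℕ) : Int := (pvHist M n).headD 0

lemma pvHist_getD (M n k : ℕ) (hk : k ≤ n) : (pvHist M n).getD k 0 = pvA M (n - k) := by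
  induction n generalizing k with
  | zero => interval_cases k; rfl
  | succ n ih =>
    cases k with
    | zero => rfl
    | succ k =>
      have hk' : k ≤ n := by omega
      show (pvHist M n).getD k 0 = _
      rw [ih k hk']
      congr 1
      omega

lemma pvA_small (M n : ℕ) (h : n ≤ M) : pvA M n = (26 : Int) ^ n % pvMOD := by
  cases n with
  | zero => simp [pvA, pvHist, pvMOD]
  | succ n => simp [pvA, pvHist, h]

lemma pvA_big (M n : ℕ) (h : M < n + 1) :
    pvA M (n + 1) = (21 * ∑ k ∈ Finset.range (M + 1), (5 : Int) ^ k * pvA M (n - k)) % pvMOD := by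
  have : ¬ (n + 1 ≤ M) := by omega
  simp only [pvA, pvHist, this, if_false, List.headD_cons]
  congr 2
  apply Finset.sum_congr rfl
  intro k hk
  simp only [Finset.mem_range] at hk
  rw [pvHist_getD M n k (by omega)]
  rfl

-- the table A fills: pvG M i j = dp[i][j]
def pvG (M : ℕ) : ℕ → ℕ → Int
  | 0, _ => 1
  | i + 1, j =>
      ((pvG M i M * 21) % pvMOD + (if 0 < j then (pvG M i (j - 1) * 5) % pvMOD else 0)) % pvMOD

-- closed congruence form of the table
def pvT (M i j : ℕ) : Int :=
  if i ≤ j then (26 : Int) ^ i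
  else 21 * ∑ k ∈ Finset.range (j + 1), (5 : Int) ^ k * pvA M (i - 1 - k)

lemma pvme (x : Int) : x % pvMOD ≡ x [ZMOD pvMOD] := Int.emod_emod_of_dvd x dvd_rfl

lemma pvT_top (M i : ℕ) : pvT M i M % pvMOD = pvA M i := by
  by_cases h : i ≤ M
  · rw [pvT, if_pos h, pvA_small M i h]
  · cases i with
    | zero => omega
    | succ n =>
      rw [pvT, if_neg h, pvA_big M n (by omega)]
      simp

lemma pvG_eq (M : ℕ) (i : ℕ) : ∀ j ≤ M, pvG M i j = pvT M i j % pvMOD := by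
  induction i with
  | zero =>
    intro j _
    show (1 : Int) = pvT M 0 j % pvMOD
    rw [pvT, if_pos (Nat.zero_le j)]
    decide
  | succ i ih =>
    intro j hj
    have hA : pvG M i M = pvA M i := by rw [ih M le_rfl, pvT_top]
    cases j with
    | zero =>
      show ((pvG M i M * 21) % pvMOD + (if (0:ℕ) < 0 then _ else 0)) % pvMOD = _
      rw [if_neg (by omega), add_zero, hA, pvT, if_neg (by omega)]
      have h1 : (pvA M i * 21) % pvMOD ≡ pvA M i * 21 [ZMOD pvMOD] := pvme _
      have h2 : (pvA M i * 21 : Int) = 21 * ∑ k ∈ Finset.range (0 + 1), (5:Int) ^ k * pvA M (i + 1 - 1 - k) := by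
        simp; ring
      rw [← h2]
      exact h1
    | succ j =>
      have hjM : j ≤ M := by omega
      show ((pvG M i M * 21) % pvMOD + (if (0:ℕ) < j + 1 then (pvG M i (j + 1 - 1) * 5) % pvMOD else 0)) % pvMOD = _
      rw [if_pos (by omega), hA]
      have hGj : pvG M i (j + 1 - 1) = pvT M i j % pvMOD := by
        simpa using ih j hjM
      rw [hGj]
      by_cases hij : i ≤ j
      · rw [pvT, if_pos hij, pvT, if_pos (by omega)]
        have hAi : pvA M i = (26:Int) ^ i % pvMOD := pvA_small M i (by omega)
        rw [hAi]
        have h1 : ((26:Int) ^ i % pvMOD * 21) % pvMOD ≡ (26:Int) ^ i * 21 [ZMOD pvMOD] :=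
          (pvme _).trans ((pvme _).mul_right 21)
        have h2 : (((26:Int) ^ i % pvMOD) * 5) % pvMOD ≡ (26:Int) ^ i * 5 [ZMOD pvMOD] :=
          (pvme _).trans ((pvme _).mul_right 5)
        have h3 := h1.add h2
        have e : (26:Int) ^ i * 21 + (26:Int) ^ i * 5 = (26:Int) ^ (i + 1) := by ring
        rw [e] at h3
        exact h3
      · rw [pvT, if_neg hij, pvT, if_neg (by omega)]
        have h1 : (pvA M i * 21) % pvMOD ≡ pvA M i * 21 [ZMOD pvMOD] := pvme _
        have h2 : ((21 * ∑ k ∈ Finset.range (j + 1), (5:Int) ^ k * pvA M (i - 1 - k)) % pvMOD * 5) % pvMOD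
            ≡ (21 * ∑ k ∈ Finset.range (j + 1), (5:Int) ^ k * pvA M (i - 1 - k)) * 5 [ZMOD pvMOD] :=
          (pvme _).trans ((pvme _).mul_right 5)
        have h3 := h1.add h2
        have e : pvA M i * 21 + (21 * ∑ k ∈ Finset.range (j + 1), (5:Int) ^ k * pvA M (i - 1 - k)) * 5
            = 21 * ∑ k ∈ Finset.range (j + 1 + 1), (5:Int) ^ k * pvA M (i + 1 - 1 - k) := by
          rw [Finset.sum_range_succ' (fun k => (5:Int) ^ k * pvA M (i + 1 - 1 - k)) (j + 1)]
          have hterm : ∀ k ∈ Finset.range (j + 1),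
              (5:Int) ^ (k + 1) * pvA M (i + 1 - 1 - (k + 1)) = 5 * ((5:Int) ^ k * pvA M (i - 1 - k)) := by
            intro k _
            rw [show i + 1 - 1 - (k + 1) = i - 1 - k from by omega]
            ring
          rw [Finset.sum_congr rfl hterm, ← Finset.mul_sum]
          simp
          ring
        rw [e] at h3
        exact h3

lemma pvG_top (M i : ℕ) : pvG M i M = pvA M i := by
  rw [pvG_eq M i M le_rfl, pvT_top]

-- ----- A side -----
def pvZrow (M : ℕ) : List Int := List.replicate (M + 1) 0

def pvRowG (M i : ℕ) : List Int := (List.range (M + 1)).map (pvG M i)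

-- list-level shadows of the Array state, used only by the proofs
def pvGet2L (dp : List (List Int)) (i j : Int) : Int :=
  (PySem.List.pyGet? ((PySem.List.pyGet? dp i).getD []) j).getD 0

def pvSet2L (dp : List (List Int)) (i j : Int) (v : Int) : List (List Int) :=
  dp.set i.toNat ((dp.getD i.toNat []).set j.toNat v)

-- the inner-loop body of A's port: Array form (exactly the port's lambda) and list shadow
def pvStepJA (mv i : Int) (dp : Array (Array Int)) (j : Int) : Array (Array Int) :=
  let dp := pvSet2 dp i j (pvGet2 dp i j + PySem.Int.mod (pvGet2 dp (i - 1) mv * 21) pvMOD)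
  let dp := if j > 0 then
      pvSet2 dp i j (pvGet2 dp i j + PySem.Int.mod (pvGet2 dp (i - 1) (j - 1) * 5) pvMOD)
    else dp
  pvSet2 dp i j (PySem.Int.mod (pvGet2 dp i j) pvMOD)

def pvStepJ (mv i : Int) (dp : List (List Int)) (j : Int) : List (List Int) :=
  let dp := pvSet2L dp i j (pvGet2L dp i j + PySem.Int.mod (pvGet2L dp (i - 1) mv * 21) pvMOD)
  let dp := if j > 0 then
      pvSet2L dp i j (pvGet2L dp i j + PySem.Int.mod (pvGet2L dp (i - 1) (j - 1) * 5) pvMOD)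
    else dp
  pvSet2L dp i j (PySem.Int.mod (pvGet2L dp i j) pvMOD)

-- the same body acting on the row being filled (prev = row i-1)
def pvRowStep (mv : Int) (prev row : List Int) (j : Int) : List Int :=
  let row := row.set j.toNat ((PySem.List.pyGet? row j).getD 0 +
    PySem.Int.mod ((PySem.List.pyGet? prev mv).getD 0 * 21) pvMOD)
  let row := if j > 0 then row.set j.toNat ((PySem.List.pyGet? row j).getD 0 +
      PySem.Int.mod ((PySem.List.pyGet? prev (j - 1)).getD 0 * 5) pvMOD)
    else row
  row.set j.toNat (PySem.Int.mod ((PySem.List.pyGet? row j).getD 0) pvMOD)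

lemma calculateWays_unfold (w mv : Int) : calculateWays w mv =
    pvGet2 ((PySem.List.pyRange 1 (w + 1) 1).foldl
      (fun dp i => (PySem.List.pyRange 0 (mv + 1) 1).foldl (pvStepJA mv i) dp)
      ((PySem.List.pyRange 0 (mv + 1) 1).foldl (fun dp i => pvSet2 dp 0 i 1)
        (((PySem.List.pyRange 0 (w + 1) 1).map
          (fun _ => (PySem.List.pyRepeat [(0 : Int)] (mv + 1)).toArray)).toArray))) w mv := rfl

-- ----- Array/List simulation -----
def pvT2 (dp : Array (Array Int)) : List (List Int) := dp.toList.map Array.toList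

lemma pv_simGetInt (a : Array Int) (n : ℕ) (d : Int) : a.getD n d = a.toList.getD n d := by
  rw [Array.getD_eq_getD_getElem?, List.getD_eq_getElem?_getD, Array.getElem?_toList]

lemma pv_simGetRow (dp : Array (Array Int)) (n : ℕ) :
    (pvT2 dp).getD n [] = (dp.getD n #[]).toList := by
  rw [Array.getD_eq_getD_getElem?, pvT2, List.getD_eq_getElem?_getD, List.getElem?_map,
    Array.getElem?_toList]
  cases dp[n]? <;> rfl

lemma pv_simGet2 (dp : Array (Array Int)) (i j : Int) (hi : 0 ≤ i) (hj : 0 ≤ j) :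
    pvGet2 dp i j = pvGet2L (pvT2 dp) i j := by
  unfold pvGet2 pvGet2L
  rw [PySem.List.pyGet?_of_nonneg _ hi, ← List.getD_eq_getElem?_getD, pv_simGetRow,
    PySem.List.pyGet?_of_nonneg _ hj, ← List.getD_eq_getElem?_getD, pv_simGetInt]

lemma pv_simSet2 (dp : Array (Array Int)) (i j : Int) (v : Int) :
    pvT2 (pvSet2 dp i j v) = pvSet2L (pvT2 dp) i j v := by
  unfold pvSet2 pvSet2L
  show (dp.modify i.toNat _).toList.map Array.toList = _
  rw [Array.toList_modify, List.modify_eq_set, List.map_set, Array.toList_setIfInBounds]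
  have hrow : (dp.toList[i.toNat]?.getD default).toList = (pvT2 dp).getD i.toNat [] := by
    rw [pv_simGetRow, Array.getD_eq_getD_getElem?, Array.getElem?_toList]
    rfl
  rw [hrow]
  rfl

lemma pv_simStepJ (mv i : Int) (hmv : 0 ≤ mv) (hi : 1 ≤ i) (dp : Array (Array Int)) (j : Int)
    (hj : 0 ≤ j) : pvT2 (pvStepJA mv i dp j) = pvStepJ mv i (pvT2 dp) j := by
  have r1 : ∀ d : Array (Array Int), pvGet2 d i j = pvGet2L (pvT2 d) i j :=
    fun d => pv_simGet2 d i j (by omega) hj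
  have r2 : ∀ d : Array (Array Int), pvGet2 d (i - 1) mv = pvGet2L (pvT2 d) (i - 1) mv :=
    fun d => pv_simGet2 d (i - 1) mv (by omega) hmv
  unfold pvStepJA pvStepJ
  by_cases hjp : j > 0
  · have r3 : ∀ d : Array (Array Int), pvGet2 d (i - 1) (j - 1) = pvGet2L (pvT2 d) (i - 1) (j - 1) :=
      fun d => pv_simGet2 d (i - 1) (j - 1) (by omega) (by omega)
    simp only [if_pos hjp, pv_simSet2, r1, r2, r3]
  · simp only [if_neg hjp, pv_simSet2, r1, r2]

lemma pv_fold_simJ (mv i : Int) (hmv : 0 ≤ mv) (hi : 1 ≤ i) (js : List Int)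
    (hjs : ∀ j ∈ js, 0 ≤ j) : ∀ dp : Array (Array Int),
    pvT2 (js.foldl (pvStepJA mv i) dp) = js.foldl (pvStepJ mv i) (pvT2 dp) := by
  induction js with
  | nil => intro dp; rfl
  | cons j t ih =>
    intro dp
    simp only [List.foldl_cons]
    rw [ih (fun x hx => hjs x (by simp [hx])), pv_simStepJ mv i hmv hi dp j (hjs j (by simp))]

lemma pv_fold_simInit (js : List Int) : ∀ dp : Array (Array Int),
    pvT2 (js.foldl (fun dp i => pvSet2 dp 0 i 1) dp)
      = js.foldl (fun dp i => pvSet2L dp 0 i 1) (pvT2 dp) := by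
  induction js with
  | nil => intro dp; rfl
  | cons j t ih =>
    intro dp
    simp only [List.foldl_cons]
    rw [ih, pv_simSet2]

lemma pvmod (a : Int) : PySem.Int.mod a pvMOD = a % pvMOD :=
  PySem.Int.mod_eq_emod_of_pos (by norm_num [pvMOD])

lemma pv_getD_set_self {α : Type} {l : List α} {i : ℕ} (h : i < l.length) (v d : α) :
    (l.set i v).getD i d = v := by
  simp [List.getD, h]

lemma pv_getD_set_ne {α : Type} {l : List α} {i j : ℕ} (h : i ≠ j) (v d : α) :
    (l.set i v).getD j d = l.getD j d := by
  simp [List.getD, List.getElem?_set_ne h]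

lemma pv_initfold (js : List Int) : ∀ (row : List Int) (rest : List (List Int)),
    js.foldl (fun dp i => pvSet2L dp 0 i 1) (row :: rest)
      = (js.foldl (fun r i => r.set i.toNat 1) row) :: rest := by
  induction js with
  | nil => intro row rest; rfl
  | cons j t ih =>
    intro row rest
    simp only [List.foldl_cons]
    have : pvSet2L (row :: rest) 0 j 1 = (row.set j.toNat 1) :: rest := by
      simp [pvSet2L]
    rw [this, ih]

lemma pv_set_ones (n : ℕ) : ∀ (row : List Int), n ≤ row.length →
    (List.range n).foldl (fun r k => r.set k (1 : Int)) row
      = List.replicate n 1 ++ row.drop n := by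
  induction n with
  | zero => intro row _; simp
  | succ n ih =>
    intro row h
    rw [List.range_succ, List.foldl_append, ih row (by omega)]
    simp only [List.foldl_cons, List.foldl_nil]
    have hn : n < row.length := by omega
    rw [List.set_append_right n 1 (by simp), List.drop_eq_getElem_cons hn]
    simp only [List.length_replicate, Nat.sub_self, List.set_cons_zero]
    rw [show List.replicate (n + 1) (1 : Int) = List.replicate n 1 ++ [1] from by
      simp [List.replicate_succ']]
    simp

lemma pvStepJ_set (mv : Int) (i : ℕ) (hi : 1 ≤ i) (dp : List (List Int))
    (hlen : i < dp.length) (j : Int) :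
    pvStepJ mv (i : Int) dp j = dp.set i (pvRowStep mv (dp.getD (i - 1) []) (dp.getD i []) j) := by
  have hi1 : ((i : Int) - 1) = ((i - 1 : ℕ) : Int) := by omega
  have hne : i ≠ i - 1 := by omega
  unfold pvStepJ pvRowStep pvSet2L pvGet2L
  by_cases hj : j > 0
  · simp only [if_pos hj, hi1, PySem.List.pyGet?_natCast,
      ← List.getD_eq_getElem?_getD, Int.toNat_natCast,
      pv_getD_set_self hlen, pv_getD_set_ne hne, List.set_set]
  · simp only [if_neg hj, hi1, PySem.List.pyGet?_natCast,
      ← List.getD_eq_getElem?_getD, Int.toNat_natCast,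
      pv_getD_set_self hlen, pv_getD_set_ne hne, List.set_set]

lemma pv_inner_factor (mv : Int) (i : ℕ) (hi : 1 ≤ i) (js : List Int) :
    ∀ dp : List (List Int), i < dp.length →
    js.foldl (pvStepJ mv (i : Int)) dp
      = dp.set i (js.foldl (pvRowStep mv (dp.getD (i - 1) [])) (dp.getD i [])) := by
  induction js with
  | nil =>
    intro dp h
    simp only [List.foldl_nil]
    rw [List.getD_eq_getElem _ _ h, List.set_getElem_self]
  | cons j t ih =>
    intro dp h
    simp only [List.foldl_cons]
    rw [pvStepJ_set mv i hi dp h j]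
    rw [ih _ (by simpa using h)]
    have h1 : (dp.set i (pvRowStep mv (dp.getD (i - 1) []) (dp.getD i []) j)).getD (i - 1) []
        = dp.getD (i - 1) [] := pv_getD_set_ne (by omega) _ _
    have h2 : (dp.set i (pvRowStep mv (dp.getD (i - 1) []) (dp.getD i []) j)).getD i []
        = pvRowStep mv (dp.getD (i - 1) []) (dp.getD i []) j := pv_getD_set_self h _ _
    rw [h1, h2, List.set_set]

lemma pvRow_fill (M i : ℕ) : ∀ t, t ≤ M + 1 →
    (List.range t).foldl (fun row (k : ℕ) => pvRowStep (M : Int) (pvRowG M i) row (k : Int)) (pvZrow M)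
      = (List.range t).map (pvG M (i + 1)) ++ List.replicate (M + 1 - t) 0 := by
  intro t
  induction t with
  | zero => intro _; simp [pvZrow]
  | succ t ih =>
    intro ht
    rw [List.range_succ, List.foldl_append, ih (by omega)]
    simp only [List.foldl_cons, List.foldl_nil]
    set pre := (List.range t).map (pvG M (i + 1)) with hpre
    have hprelen : pre.length = t := by simp [hpre]
    have hrep : List.replicate (M + 1 - t) (0 : Int) = 0 :: List.replicate (M - t) 0 := by
      rw [show M + 1 - t = (M - t) + 1 from by omega, List.replicate_succ]
    have hrowlen : (pre ++ List.replicate (M + 1 - t) (0 : Int)).length = M + 1 := by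
      simp [hprelen]; omega
    have hread0 : (pre ++ List.replicate (M + 1 - t) (0 : Int)).getD t 0 = 0 := by
      rw [List.getD_append_right _ _ _ _ (by omega), hprelen, Nat.sub_self, hrep]
      rfl
    have hprevM : (pvRowG M i).getD M 0 = pvG M i M := by
      rw [pvRowG, PySem.List.getD_map_range _ _ _ _ (by omega)]
    have htlen : t < (pre ++ List.replicate (M + 1 - t) (0 : Int)).length := by
      rw [hrowlen]; omega
    have hsetv : ∀ v : Int, (pre ++ List.replicate (M + 1 - t) (0 : Int)).set t v
        = pre ++ v :: List.replicate (M - t) 0 := by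
      intro v
      rw [List.set_append_right t v (le_of_eq hprelen), hprelen, Nat.sub_self, hrep,
        List.set_cons_zero]
    have hrhs : (List.range t ++ [t]).map (pvG M (i + 1)) ++ List.replicate (M + 1 - (t + 1)) (0 : Int)
        = pre ++ pvG M (i + 1) t :: List.replicate (M - t) 0 := by
      rw [List.map_append, ← hpre, show M + 1 - (t + 1) = M - t from by omega]
      simp
    unfold pvRowStep
    by_cases htpos : ((t : Int) > 0)
    · have ht0 : 0 < t := by exact_mod_cast htpos
      have hprevt : ∀ (z : Int), (PySem.List.pyGet? (pvRowG M i) ((t : Int) - 1)).getD z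
          = pvG M i (t - 1) := by
        intro z
        rw [show ((t : Int) - 1) = ((t - 1 : ℕ) : Int) from by omega, PySem.List.pyGet?_natCast,
          ← List.getD_eq_getElem?_getD, pvRowG, PySem.List.getD_map_range _ _ _ _ (by omega)]
      simp only [if_pos htpos, PySem.List.pyGet?_natCast, ← List.getD_eq_getElem?_getD,
        Int.toNat_natCast, List.set_set, pv_getD_set_self htlen, hread0, hprevM, hprevt, pvmod]
      rw [hsetv, hrhs]
      have hval : (0 + pvG M i M * 21 % pvMOD + pvG M i (t - 1) * 5 % pvMOD) % pvMOD
          = pvG M (i + 1) t := by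
        rw [show pvG M (i + 1) t
            = ((pvG M i M * 21) % pvMOD + (if 0 < t then (pvG M i (t - 1) * 5) % pvMOD else 0)) % pvMOD
          from by simp [pvG], if_pos ht0, zero_add]
      rw [hval]
    · simp only [if_neg htpos, PySem.List.pyGet?_natCast, ← List.getD_eq_getElem?_getD,
        Int.toNat_natCast, List.set_set, pv_getD_set_self htlen, hread0, hprevM, pvmod]
      rw [hsetv, hrhs]
      have hval : (0 + pvG M i M * 21 % pvMOD) % pvMOD = pvG M (i + 1) t := by
        rw [show pvG M (i + 1) t
            = ((pvG M i M * 21) % pvMOD + (if 0 < t then (pvG M i (t - 1) * 5) % pvMOD else 0)) % pvMOD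
          from by simp [pvG], if_neg (by omega), add_zero, zero_add]
      rw [hval]

lemma pv_outer (M L : ℕ) : ∀ k, k ≤ L →
    (List.range k).foldl
      (fun dp (kk : ℕ) => (PySem.List.pyRange 0 ((M : Int) + 1) 1).foldl
        (pvStepJ (M : Int) (1 + (kk : Int))) dp)
      (pvRowG M 0 :: List.replicate L (pvZrow M))
      = (List.range (k + 1)).map (pvRowG M) ++ List.replicate (L - k) (pvZrow M) := by
  intro k
  induction k with
  | zero => intro _; simp [List.range_one]
  | succ k ih =>
    intro hk
    rw [List.range_succ, List.foldl_append, ih (by omega)]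
    simp only [List.foldl_cons, List.foldl_nil]
    set D := (List.range (k + 1)).map (pvRowG M) ++ List.replicate (L - k) (pvZrow M) with hD
    have hDlen : D.length = L + 1 := by simp [hD]; omega
    have hcast : (1 + (k : Int)) = ((k + 1 : ℕ) : Int) := by omega
    rw [hcast, pv_inner_factor (M : Int) (k + 1) (by omega) _ D (by omega)]
    have hprev : D.getD (k + 1 - 1) [] = pvRowG M k := by
      rw [hD, show k + 1 - 1 = k from rfl, List.getD_append _ _ _ _ (by simp),
        PySem.List.getD_map_range _ _ _ _ (by omega)]
    have hcur : D.getD (k + 1) [] = pvZrow M := by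
      rw [hD, List.getD_append_right _ _ _ _ (by simp), List.length_map, List.length_range,
        Nat.sub_self, show List.replicate (L - k) (pvZrow M) = pvZrow M :: List.replicate (L - k - 1) (pvZrow M) from by
          rw [← List.replicate_succ]; congr 1; omega]
      rfl
    rw [hprev, hcur]
    have hinner : (PySem.List.pyRange 0 ((M : Int) + 1) 1).foldl (pvRowStep (M : Int) (pvRowG M k)) (pvZrow M)
        = pvRowG M (k + 1) := by
      rw [show ((M : Int) + 1) = ((M + 1 : ℕ) : Int) from by omega,
        PySem.List.pyRange_one 0 ((M + 1 : ℕ) : Int),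
        show (((M + 1 : ℕ) : Int) - 0).toNat = M + 1 from by omega, List.foldl_map]
      simp only [zero_add]
      rw [pvRow_fill M k (M + 1) le_rfl]
      simp [pvRowG]
    rw [hinner, hD]
    rw [List.set_append_right _ _ (by simp),
      show List.replicate (L - k) (pvZrow M) = pvZrow M :: List.replicate (L - k - 1) (pvZrow M) from by
        rw [← List.replicate_succ]; congr 1; omega]
    simp only [List.length_map, List.length_range, Nat.sub_self, List.set_cons_zero]
    rw [show List.range (k + 1 + 1) = List.range (k + 1) ++ [k + 1] from List.range_succ,
      List.map_append]
    simp [show L - (k + 1) = L - k - 1 from by omega]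

lemma pv_fold_simOuter (mv : Int) (hmv : 0 ≤ mv) (is : List Int) (his : ∀ i ∈ is, 1 ≤ i) :
    ∀ dp : Array (Array Int),
    pvT2 (is.foldl (fun dp i => (PySem.List.pyRange 0 (mv + 1) 1).foldl (pvStepJA mv i) dp) dp)
      = is.foldl (fun dp i => (PySem.List.pyRange 0 (mv + 1) 1).foldl (pvStepJ mv i) dp) (pvT2 dp) := by
  induction is with
  | nil => intro dp; rfl
  | cons i t ih =>
    intro dp
    simp only [List.foldl_cons]
    rw [ih (fun x hx => his x (by simp [hx])),
      pv_fold_simJ mv i hmv (his i (by simp)) _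
        (fun j hj => ((PySem.List.mem_pyRange_one).1 hj).1) dp]

lemma pv_list_pipeline (L M : ℕ) :
    pvGet2L ((PySem.List.pyRange 1 ((L : Int) + 1) 1).foldl
      (fun dp i => (PySem.List.pyRange 0 ((M : Int) + 1) 1).foldl (pvStepJ (M : Int) i) dp)
      ((PySem.List.pyRange 0 ((M : Int) + 1) 1).foldl (fun dp i => pvSet2L dp 0 i 1)
        ((PySem.List.pyRange 0 ((L : Int) + 1) 1).map
          (fun _ => PySem.List.pyRepeat [(0 : Int)] ((M : Int) + 1))))) (L : Int) (M : Int)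
      = pvA M L := by
  have hM1 : ((M : Int) + 1) = ((M + 1 : ℕ) : Int) := by omega
  have hL1 : ((L : Int) + 1) = ((L + 1 : ℕ) : Int) := by omega
  have hinit : (PySem.List.pyRange 0 ((L : Int) + 1) 1).map
      (fun _ => PySem.List.pyRepeat [(0 : Int)] ((M : Int) + 1))
      = pvZrow M :: List.replicate L (pvZrow M) := by
    rw [PySem.List.pyRepeat_singleton, show ((M : Int) + 1).toNat = M + 1 from by omega,
      List.map_const', PySem.List.length_pyRange_one,
      show (((L : Int) + 1) - 0).toNat = L + 1 from by omega]
    rw [← List.replicate_succ]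
    rfl
  rw [hinit, pv_initfold]
  have hones : (PySem.List.pyRange 0 ((M : Int) + 1) 1).foldl (fun r i => r.set i.toNat 1) (pvZrow M)
      = pvRowG M 0 := by
    rw [hM1, PySem.List.pyRange_one 0 ((M + 1 : ℕ) : Int),
      show (((M + 1 : ℕ) : Int) - 0).toNat = M + 1 from by omega, List.foldl_map]
    simp only [zero_add, Int.toNat_natCast]
    rw [pv_set_ones (M + 1) (pvZrow M) (by simp [pvZrow])]
    rw [show (pvZrow M).drop (M + 1) = [] from by simp [pvZrow]]
    rw [List.append_nil, pvRowG]
    have : ∀ j, j ∈ List.range (M + 1) → pvG M 0 j = 1 := by intro j _; rfl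
    rw [List.map_congr_left this, List.map_const', List.length_range]
  rw [hones]
  have houter : (PySem.List.pyRange 1 ((L : Int) + 1) 1).foldl
      (fun dp i => (PySem.List.pyRange 0 ((M : Int) + 1) 1).foldl (pvStepJ (M : Int) i) dp)
      (pvRowG M 0 :: List.replicate L (pvZrow M))
      = (List.range (L + 1)).map (pvRowG M) := by
    rw [PySem.List.pyRange_one 1 ((L : Int) + 1),
      show (((L : Int) + 1) - 1).toNat = L from by omega, List.foldl_map]
    rw [pv_outer M L L le_rfl]
    simp
  rw [houter]
  unfold pvGet2L
  simp only [PySem.List.pyGet?_natCast, ← List.getD_eq_getElem?_getD]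
  rw [PySem.List.getD_map_range _ _ _ _ (by omega)]
  simp only [pvRowG]
  rw [PySem.List.getD_map_range _ _ _ _ (by omega), pvG_top]

theorem calculateWays_eq_pvA (L M : ℕ) :
    calculateWays (L : Int) (M : Int) = pvA M L := by
  rw [calculateWays_unfold,
    pv_simGet2 _ _ _ (Int.natCast_nonneg L) (Int.natCast_nonneg M),
    pv_fold_simOuter (M : Int) (Int.natCast_nonneg M) _
      (fun i hi => ((PySem.List.mem_pyRange_one).1 hi).1) _,
    pv_fold_simInit]
  rw [show pvT2 (((PySem.List.pyRange 0 ((L : Int) + 1) 1).map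
      (fun _ => (PySem.List.pyRepeat [(0 : Int)] ((M : Int) + 1)).toArray)).toArray)
    = (PySem.List.pyRange 0 ((L : Int) + 1) 1).map
      (fun _ => PySem.List.pyRepeat [(0 : Int)] ((M : Int) + 1)) from by
    simp [pvT2]]
  exact pv_list_pipeline L M

-- ----- B side -----
def pvPw (n : ℕ) : Int := (26 : Int) ^ n % pvMOD

lemma pv_b_init (M : ℕ) :
    (PySem.List.pyRange 0 (M : Int) 1).foldl
      (fun a _ => a ++ [(((PySem.List.pyGet? a (-1)).getD 0) * 26) % pvMOD]) [1]
    = (List.range (M + 1)).map pvPw := by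
  induction M with
  | zero =>
    rw [show ((0 : ℕ) : Int) = 0 from rfl, PySem.List.pyRange_one_eq_nil le_rfl]
    simp [pvPw, pvMOD, List.range_one]
  | succ M ih =>
    rw [show ((M + 1 : ℕ) : Int) = (M : Int) + 1 from by push_cast; ring,
      PySem.List.pyRange_one_succ_right (Int.natCast_nonneg M), List.foldl_append, ih]
    simp only [List.foldl_cons, List.foldl_nil]
    have hsplit : (List.range (M + 1)).map pvPw = (List.range M).map pvPw ++ [pvPw M] := by
      rw [List.range_succ, List.map_append]; rfl
    rw [hsplit, PySem.List.pyGet?_neg_one, List.getLast?_concat]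
    have hv : ((some (pvPw M)).getD 0 * 26) % pvMOD = pvPw (M + 1) := by
      show (pvPw M * 26) % pvMOD = pvPw (M + 1)
      rw [pvPw, pvPw]
      have h := (pvme ((26 : Int) ^ M)).mul_right 26
      have e : (26 : Int) ^ M * 26 = 26 ^ (M + 1) := by ring
      rw [e] at h
      exact h
    rw [hv, show (List.range (M + 1 + 1)).map pvPw = (List.range (M + 1)).map pvPw ++ [pvPw (M + 1)] from by
      rw [List.range_succ, List.map_append]; rfl, hsplit]

lemma pv_horner_mod (vs : List Int) : ∀ S : Int,
    vs.foldl (fun S v => (S * 5 + v) % pvMOD) (S % pvMOD)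
      = (vs.foldl (fun S v => S * 5 + v) S) % pvMOD := by
  induction vs with
  | nil => intro S; rfl
  | cons v t ih =>
    intro S
    simp only [List.foldl_cons]
    rw [show (S % pvMOD * 5 + v) % pvMOD = (S * 5 + v) % pvMOD from ((pvme S).mul_right 5).add_right v]
    exact ih (S * 5 + v)

lemma pv_horner_sum (f : ℕ → Int) : ∀ t : ℕ,
    ((List.range (t + 1)).map f).foldl (fun S v => S * 5 + v) 0
      = ∑ k ∈ Finset.range (t + 1), (5 : Int) ^ (t - k) * f k := by
  intro t
  induction t with
  | zero => simp [List.range_one]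
  | succ t ih =>
    rw [show (List.range (t + 1 + 1)).map f = (List.range (t + 1)).map f ++ [f (t + 1)] from by
      rw [List.range_succ, List.map_append]; rfl, List.foldl_append, ih]
    simp only [List.foldl_cons, List.foldl_nil]
    rw [Finset.sum_range_succ (fun k => (5 : Int) ^ (t + 1 - k) * f k) (t + 1)]
    have hstep : ∀ k ∈ Finset.range (t + 1),
        (5 : Int) ^ (t + 1 - k) * f k = 5 * ((5 : Int) ^ (t - k) * f k) := by
      intro k hk
      simp only [Finset.mem_range] at hk
      rw [show t + 1 - k = (t - k) + 1 from by omega]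
      ring
    rw [Finset.sum_congr rfl hstep, ← Finset.mul_sum]
    simp
    ring

def pvSS (M t : ℕ) : Int := (∑ k ∈ Finset.range (M + 1), (5 : Int) ^ k * pvA M (t - k)) % pvMOD

lemma pv_S_init (M : ℕ) :
    ((List.range (M + 1)).map (pvA M)).foldl (fun S v => (S * 5 + v) % pvMOD) 0 = pvSS M M := by
  have h := pv_horner_mod ((List.range (M + 1)).map (pvA M)) 0
  rw [show (0 : Int) % pvMOD = 0 from by norm_num [pvMOD]] at h
  rw [h, pv_horner_sum (pvA M) M, pvSS]
  congr 1
  rw [← Finset.sum_range_reflect (fun k => (5 : Int) ^ k * pvA M (M - k)) (M + 1)]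
  apply Finset.sum_congr rfl
  intro j hj
  simp only [Finset.mem_range] at hj
  rw [show M + 1 - 1 - j = M - j from by omega, show M - (M - j) = j from by omega]

lemma pv_loop (M : ℕ) : ∀ d : ℕ,
    (PySem.List.pyRange ((M : Int) + 1) ((M : Int) + 1 + (d : Int)) 1).foldl
      (fun (p : List Int × Int) n =>
        (p.1 ++ [(21 * p.2) % pvMOD],
         (5 * p.2 + (21 * p.2) % pvMOD - ((5 : Int) ^ (M + 1) % pvMOD) *
           ((PySem.List.pyGet? (p.1 ++ [(21 * p.2) % pvMOD]) (n - (M : Int) - 1)).getD 0)) % pvMOD))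
      ((List.range (M + 1)).map (pvA M), pvSS M M)
    = ((List.range (M + d + 1)).map (pvA M), pvSS M (M + d)) := by
  intro d
  induction d with
  | zero =>
    rw [show ((M : Int) + 1 + ((0 : ℕ) : Int)) = (M : Int) + 1 from by push_cast; ring,
      PySem.List.pyRange_one_eq_nil le_rfl]
    rfl
  | succ d ih =>
    rw [show ((M : Int) + 1 + ((d + 1 : ℕ) : Int)) = ((M : Int) + 1 + (d : Int)) + 1 from by
      push_cast; ring,
      PySem.List.pyRange_one_succ_right (by omega), List.foldl_append, ih]
    simp only [List.foldl_cons, List.foldl_nil]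
    have han : (21 * pvSS M (M + d)) % pvMOD = pvA M (M + d + 1) := by
      rw [pvSS, pvA_big M (M + d) (by omega)]
      exact (pvme _).mul_left 21
    have ha' : (List.range (M + d + 1 + 1)).map (pvA M)
        = (List.range (M + d + 1)).map (pvA M) ++ [pvA M (M + d + 1)] := by
      rw [List.range_succ, List.map_append]; rfl
    have hidx : ((M : Int) + 1 + (d : Int) - (M : Int) - 1) = ((d : ℕ) : Int) := by omega
    have hread : (PySem.List.pyGet? ((List.range (M + d + 1 + 1)).map (pvA M)) ((d : ℕ) : Int)).getD 0
        = pvA M d := by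
      rw [PySem.List.pyGet?_natCast, ← List.getD_eq_getElem?_getD,
        PySem.List.getD_map_range _ _ _ _ (by omega)]
    have hS : (5 * pvSS M (M + d) + pvA M (M + d + 1) - ((5 : Int) ^ (M + 1) % pvMOD) * pvA M d) % pvMOD
        = pvSS M (M + d + 1) := by
      rw [pvSS, pvSS]
      have hcong : 5 * ((∑ k ∈ Finset.range (M + 1), (5 : Int) ^ k * pvA M (M + d - k)) % pvMOD)
            + pvA M (M + d + 1) - ((5 : Int) ^ (M + 1) % pvMOD) * pvA M d
          ≡ 5 * (∑ k ∈ Finset.range (M + 1), (5 : Int) ^ k * pvA M (M + d - k))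
            + pvA M (M + d + 1) - (5 : Int) ^ (M + 1) * pvA M d [ZMOD pvMOD] :=
        (((pvme _).mul_left 5).add_right _).sub ((pvme _).mul_right _)
      have hring : 5 * (∑ k ∈ Finset.range (M + 1), (5 : Int) ^ k * pvA M (M + d - k))
            + pvA M (M + d + 1) - (5 : Int) ^ (M + 1) * pvA M d
          = ∑ k ∈ Finset.range (M + 1), (5 : Int) ^ k * pvA M (M + d + 1 - k) := by
        rw [Finset.sum_range_succ' (fun k => (5 : Int) ^ k * pvA M (M + d + 1 - k)) M,
          Finset.sum_range_succ (fun k => (5 : Int) ^ k * pvA M (M + d - k)) M]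
        have hterm : ∀ k ∈ Finset.range M,
            (5 : Int) ^ (k + 1) * pvA M (M + d + 1 - (k + 1)) = 5 * ((5 : Int) ^ k * pvA M (M + d - k)) := by
          intro k _
          rw [show M + d + 1 - (k + 1) = M + d - k from by omega]
          ring
        rw [Finset.sum_congr rfl hterm, ← Finset.mul_sum,
          show M + d - M = d from by omega, show M + d + 1 - 0 = M + d + 1 from by omega]
        ring
      rw [← hring]
      exact hcong
    rw [han, ← ha', hidx, hread, hS, show M + (d + 1) = M + d + 1 from by omega]

lemma pv_b_initsim (js : List Int) : ∀ a0 : Array Int,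
    (js.foldl (fun a _ => a.push ((a.getD (a.size - 1) 0) * 26 % pvMOD)) a0).toList
      = js.foldl (fun a _ => a ++ [(((PySem.List.pyGet? a (-1)).getD 0) * 26) % pvMOD]) a0.toList := by
  induction js with
  | nil => intro a0; rfl
  | cons x t ih =>
    intro a0
    simp only [List.foldl_cons]
    rw [ih, Array.toList_push]
    have hlast : a0.getD (a0.size - 1) 0 = (PySem.List.pyGet? a0.toList (-1)).getD 0 := by
      rw [PySem.List.pyGet?_neg_one, pv_simGetInt,
        show a0.size = a0.toList.length from (Array.length_toList).symm,
        List.getLast?_eq_getElem?, List.getD_eq_getElem?_getD]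
    rw [hlast]

lemma pv_b_loopsim (M : ℕ) (js : List Int) (hjs : ∀ n ∈ js, (M : Int) + 1 ≤ n) :
    ∀ p : Array Int × Int,
    (((js.foldl (fun (p : Array Int × Int) n =>
        (p.1.push (21 * p.2 % pvMOD),
         (5 * p.2 + 21 * p.2 % pvMOD - (5 : Int) ^ (M + 1) % pvMOD *
           ((p.1.push (21 * p.2 % pvMOD)).getD (n - (M : Int) - 1).toNat 0)) % pvMOD)) p).1).toList,
      (js.foldl (fun (p : Array Int × Int) n =>
        (p.1.push (21 * p.2 % pvMOD),
         (5 * p.2 + 21 * p.2 % pvMOD - (5 : Int) ^ (M + 1) % pvMOD *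
           ((p.1.push (21 * p.2 % pvMOD)).getD (n - (M : Int) - 1).toNat 0)) % pvMOD)) p).2)
    = js.foldl (fun (p : List Int × Int) n =>
        (p.1 ++ [(21 * p.2) % pvMOD],
         (5 * p.2 + (21 * p.2) % pvMOD - ((5 : Int) ^ (M + 1) % pvMOD) *
           ((PySem.List.pyGet? (p.1 ++ [(21 * p.2) % pvMOD]) (n - (M : Int) - 1)).getD 0)) % pvMOD))
        (p.1.toList, p.2) := by
  induction js with
  | nil => intro p; rfl
  | cons n t ih =>
    intro p
    simp only [List.foldl_cons]
    rw [ih (fun x hx => hjs x (by simp [hx]))]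
    have hn : (M : Int) + 1 ≤ n := hjs n (by simp)
    have hread : (p.1.push (21 * p.2 % pvMOD)).getD (n - (M : Int) - 1).toNat 0
        = (PySem.List.pyGet? (p.1.toList ++ [(21 * p.2) % pvMOD]) (n - (M : Int) - 1)).getD 0 := by
      rw [PySem.List.pyGet?_of_nonneg _ (by omega : (0:Int) ≤ n - (M : Int) - 1),
        ← List.getD_eq_getElem?_getD, ← Array.toList_push, ← pv_simGetInt]
    rw [hread, Array.toList_push]

lemma pv_b_loopsim_fst (M : ℕ) (js : List Int) (hjs : ∀ n ∈ js, (M : Int) + 1 ≤ n)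
    (p : Array Int × Int) :
    ((js.foldl (fun (p : Array Int × Int) n =>
        (p.1.push (21 * p.2 % pvMOD),
         (5 * p.2 + 21 * p.2 % pvMOD - (5 : Int) ^ (M + 1) % pvMOD *
           ((p.1.push (21 * p.2 % pvMOD)).getD (n - (M : Int) - 1).toNat 0)) % pvMOD)) p).1).toList
    = (js.foldl (fun (p : List Int × Int) n =>
        (p.1 ++ [(21 * p.2) % pvMOD],
         (5 * p.2 + (21 * p.2) % pvMOD - ((5 : Int) ^ (M + 1) % pvMOD) *
           ((PySem.List.pyGet? (p.1 ++ [(21 * p.2) % pvMOD]) (n - (M : Int) - 1)).getD 0)) % pvMOD))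
        (p.1.toList, p.2)).1 := by
  have h := congrArg Prod.fst (pv_b_loopsim M js hjs p)
  simpa using h

theorem calculateWays_alt_eq_pvA (L M : ℕ) :
    calculateWays_alt (L : Int) (M : Int) = pvA M L := by
  simp only [calculateWays_alt, PySem.Int.powMod, pvmod,
    show (((M : Int)) + 1).toNat = M + 1 from by omega]
  rw [show ((L : Int)).toNat = L from by omega, pv_simGetInt]
  set A0 := (PySem.List.pyRange 0 (M : Int) 1).foldl
    (fun a _ => a.push ((a.getD (a.size - 1) 0) * 26 % pvMOD)) #[(1 : Int)] with hA0
  set S0 := Array.foldl (fun S v => (S * 5 + v) % pvMOD) 0 A0 with hS0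
  rw [pv_b_loopsim_fst M (PySem.List.pyRange ((M : Int) + 1) ((L : Int) + 1) 1)
    (fun n hn => ((PySem.List.mem_pyRange_one).1 hn).1) (A0, S0)]
  dsimp only
  have hAlist : A0.toList = (List.range (M + 1)).map (pvA M) := by
    rw [hA0, pv_b_initsim, show (#[(1 : Int)] : Array Int).toList = [1] from rfl, pv_b_init M]
    exact List.map_congr_left (by
      intro n hn
      simp only [List.mem_range] at hn
      rw [pvPw, pvA_small M n (by omega)])
  have hS0v : S0 = pvSS M M := by
    rw [hS0, ← Array.foldl_toList, hAlist, pv_S_init M]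
  rw [hAlist, hS0v]
  by_cases hLM : M ≤ L
  · rw [show ((L : Int) + 1) = ((M : Int) + 1 + ((L - M : ℕ) : Int)) from by omega,
      pv_loop M (L - M), show M + (L - M) = L from by omega,
      PySem.List.getD_map_range _ _ _ _ (by omega)]
  · rw [PySem.List.pyRange_one_eq_nil (by omega : ((L : Int) + 1) ≤ (M : Int) + 1)]
    simp only [List.foldl_nil]
    rw [PySem.List.getD_map_range _ _ _ _ (by omega)]

-- ===== VERDICT (by name: the statement is the Claim_ definition above) =====
theorem calculateWays_spec : Claim_equal_calculateWays := by
  intro wordLen maxVowels _ hpre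
  obtain ⟨hw, hm⟩ := hpre
  unfold Spec_calculateWays
  obtain ⟨L, rfl⟩ := Int.eq_ofNat_of_zero_le hw
  obtain ⟨M, rfl⟩ := Int.eq_ofNat_of_zero_le hm
  rw [calculateWays_eq_pvA, calculateWays_alt_eq_pvA]
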